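-- pv_equiv track=rewrite | github.com/bluerxing/odor | 03_rule_extraction/v5_data.py | parse_kegg_flat
-- ===== SOURCE A (Python) =====
-- def parse_kegg_flat(text: str) -> dict:
--     """Parse KEGG flat-format text, handling continuation lines."""
--     fields = {}
--     current_key = None
--     for raw_line in text.splitlines():
--         key = raw_line[:12].strip()
--         val = raw_line[12:].strip()
--         if key:
--             current_key = key
--             if current_key not in fields:
--                 fields[current_key] = []
--             if val:
--                 fields[current_key].append(val)
--         elif current_key and val:
--             fields[current_key].append(val)
--     return {k: " ".join(v) for k, v in fields.items()}
-- ===== SOURCE B (Python) =====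
-- def parse_kegg_flat(text: str) -> dict:
--     """Parse KEGG flat-format text, handling continuation lines."""
--     # Stage 1: split every line into its (key-column, value-column) parts.
--     parsed = [(ln[:12].strip(), ln[12:].strip()) for ln in text.splitlines()]
--     # Stage 2: chunk the lines into per-header records: each keyed line opens a
--     # record; a continuation line's value is appended to the last open record.
--     records = []
--     for key, val in parsed:
--         if key:
--             records.append((key, [val] if val else []))
--         elif records and val:
--             records[-1][1].append(val)
--     # Stage 3: merge records that share a key (first-occurrence order) and join.
--     fields = {}
--     for key, vals in records:
--         fields[key] = fields.get(key, []) + vals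
--     return {k: " ".join(v) for k, v in fields.items()}
-- ===== Notes on version B (the rewrite author's own statement) =====
-- stated objective: alternative
-- what changed: Replaces A's single stateful loop (dict built incrementally under a current_key register) by three staged passes: parse every line into (key, val), chunk the lines into per-header records where continuations append to the LAST record (no current_key state), then merge records sharing a key via get()-concatenation and join.
import Mathlib
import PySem

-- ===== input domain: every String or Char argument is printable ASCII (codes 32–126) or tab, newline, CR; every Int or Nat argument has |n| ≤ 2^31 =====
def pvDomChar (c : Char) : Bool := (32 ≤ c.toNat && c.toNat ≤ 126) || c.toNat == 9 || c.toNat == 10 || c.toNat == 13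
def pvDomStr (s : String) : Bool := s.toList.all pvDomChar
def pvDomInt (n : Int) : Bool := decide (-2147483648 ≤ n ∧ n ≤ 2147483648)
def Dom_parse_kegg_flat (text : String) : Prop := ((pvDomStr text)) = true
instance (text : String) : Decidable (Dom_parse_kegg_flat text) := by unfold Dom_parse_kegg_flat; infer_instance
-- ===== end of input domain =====

-- B replaces A's single dict-building loop with three staged passes: parse each line into
-- (key, val), chunk the lines into per-header records (continuations append to the last
-- record), then merge records sharing a key and join (alternative decomposition, same cost).

-- ===== PORT A =====
-- one iteration of A's loop: state is (fields, current_key)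
def pvAStep (st : PySem.Dict String (List String) × Option String) (raw_line : String) :
    PySem.Dict String (List String) × Option String :=
  let key := PySem.Str.strip (PySem.Str.slice raw_line none (some 12))
  let val := PySem.Str.strip (PySem.Str.slice raw_line (some 12) none)
  if key ≠ "" then
    let d := if st.1.contains key then st.1 else st.1.insert key []
    let d := if val ≠ "" then d.modify key [] (· ++ [val]) else d
    (d, some key)
  else
    match st.2 with
    | some ck => if ck ≠ "" && val ≠ "" then (st.1.modify ck [] (· ++ [val]), st.2) else st
    | none => st

def parse_kegg_flat (text : String) : List (String × String) :=
  let fields := ((PySem.Str.splitlines text).foldl pvAStep (PySem.Dict.empty, none)).1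
  fields.items.map (fun kv => (kv.1, PySem.Str.join " " kv.2))

-- ===== PORT B =====
-- stage 1: a line's (key-column, value-column) parts
def pvParseLine (raw : String) : String × String :=
  (PySem.Str.strip (PySem.Str.slice raw none (some 12)),
   PySem.Str.strip (PySem.Str.slice raw (some 12) none))

-- stage 2 iteration: keyed line opens a record, continuation appends to the last record
def pvChunkStep (records : List (String × List String)) (kv : String × String) :
    List (String × List String) :=
  if kv.1 ≠ "" then records ++ [(kv.1, if kv.2 ≠ "" then [kv.2] else [])]
  else if records ≠ [] && kv.2 ≠ "" then
    match records.getLast? with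
    | some (c, vs) => records.dropLast ++ [(c, vs ++ [kv.2])]
    | none => records
  else records

-- stage 3 iteration: merge one record into the field dict
def pvMergeStep (d : PySem.Dict String (List String)) (rec : String × List String) :
    PySem.Dict String (List String) :=
  d.insert rec.1 (d.getD rec.1 [] ++ rec.2)

def parse_kegg_flat_alt (text : String) : List (String × String) :=
  let parsed := (PySem.Str.splitlines text).map pvParseLine
  let records := parsed.foldl pvChunkStep []
  let fields := records.foldl pvMergeStep PySem.Dict.empty
  fields.items.map (fun kv => (kv.1, PySem.Str.join " " kv.2))

-- ===== PRECONDITION & SPEC =====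
def Spec_parse_kegg_flat (text : String) (out : List (String × String)) : Prop := out = parse_kegg_flat_alt text
instance (text : String) (out : List (String × String)) : Decidable (Spec_parse_kegg_flat text out) := by unfold Spec_parse_kegg_flat; infer_instance

-- ===== CLAIM (what is proved, stated in full; the proofs are below) =====
def Claim_equal_parse_kegg_flat : Prop := ∀ (text : String), Dom_parse_kegg_flat text → Spec_parse_kegg_flat text (parse_kegg_flat text)

-- ===== LEMMAS AND PROOFS =====

-- merging a record list into the empty dict
def pvMergeF (cs : List (String × List String)) : PySem.Dict String (List String) :=
  cs.foldl pvMergeStep PySem.Dict.empty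

theorem pvMergeStep_eq (d : PySem.Dict String (List String)) (k : String) (vs : List String) :
    pvMergeStep d (k, vs) = d.insert k (d.getD k [] ++ vs) := rfl

theorem pvModify_eq (d : PySem.Dict String (List String)) (k v : String) :
    d.modify k [] (· ++ [v]) = d.insert k (d.getD k [] ++ [v]) := rfl

theorem pvMergeF_concat (cs : List (String × List String)) (p : String × List String) :
    pvMergeF (cs ++ [p]) = pvMergeStep (pvMergeF cs) p := by
  simp [pvMergeF]

theorem pvNodup_mergeF (cs : List (String × List String)) : (pvMergeF cs).keys.Nodup := by
  unfold pvMergeF pvMergeStep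
  exact PySem.Dict.nodup_keys_foldl_insert_key cs Prod.fst _ _ PySem.Dict.nodup_keys_empty

theorem pvInsert_getD_self (d : PySem.Dict String (List String)) (k : String)
    (h : d.contains k = true) (hnd : d.keys.Nodup) : d.insert k (d.getD k []) = d := by
  apply PySem.Dict.ext
  rw [PySem.Dict.items_insert_of_contains d _ h]
  refine (List.map_congr_left ?_).trans (List.map_id _)
  intro p hp
  rcases p with ⟨pk, pv⟩
  by_cases hk : pk = k
  · subst hk
    have := PySem.Dict.getD_of_mem_items d hp hnd []
    simp [this]
  · simp [fun h => hk (by exact h)]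

-- A's keyed-line step on the dict equals merging one fresh record
theorem pvKeyStep (d : PySem.Dict String (List String)) (k v : String) (hnd : d.keys.Nodup) :
    (if v ≠ "" then (if d.contains k then d else d.insert k []).modify k [] (· ++ [v])
     else (if d.contains k then d else d.insert k [])) =
      pvMergeStep d (k, if v ≠ "" then [v] else []) := by
  by_cases hc : d.contains k = true
  · by_cases hv : v ≠ ""
    · rw [if_pos hv, if_pos hc, pvModify_eq, pvMergeStep_eq]
      simp [hv]
    · rw [not_not] at hv
      rw [if_neg (by simp [hv]), if_pos hc, pvMergeStep_eq]
      simp [hv, pvInsert_getD_self d k hc hnd]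
  · simp only [Bool.not_eq_true] at hc
    by_cases hv : v ≠ ""
    · rw [if_pos hv, if_neg (by simp [hc]), pvModify_eq, PySem.Dict.getD_insert_self,
        PySem.Dict.insert_insert_self, pvMergeStep_eq]
      simp [hv, PySem.Dict.getD_of_not_contains d ([] : List String) hc]
    · rw [not_not] at hv
      rw [if_neg (by simp [hv]), if_neg (by simp [hc]), pvMergeStep_eq]
      simp [hv, PySem.Dict.getD_of_not_contains d ([] : List String) hc]

-- A's continuation step on a merged record list appends to the last record
theorem pvContStep (d : PySem.Dict String (List String)) (c v : String) (vs : List String) :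
    (pvMergeStep d (c, vs)).modify c [] (· ++ [v]) = pvMergeStep d (c, vs ++ [v]) := by
  rw [pvMergeStep_eq, pvModify_eq, PySem.Dict.getD_insert_self, PySem.Dict.insert_insert_self,
    pvMergeStep_eq, List.append_assoc]

-- main invariant: running A's loop from the dict built by merging the records so far,
-- with current_key = the last record's key, equals merging the final record list
theorem pvMain (ls : List String) (cs : List (String × List String))
    (hcs : ∀ p ∈ cs, p.1 ≠ "") :
    (ls.foldl pvAStep (pvMergeF cs, (cs.getLast?).map Prod.fst)).1 =
      pvMergeF ((ls.map pvParseLine).foldl pvChunkStep cs) := by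
  induction ls generalizing cs with
  | nil => simp
  | cons raw ls ih =>
    simp only [List.map_cons, List.foldl_cons]
    set key := PySem.Str.strip (PySem.Str.slice raw none (some 12)) with hkeydef
    set val := PySem.Str.strip (PySem.Str.slice raw (some 12) none) with hvaldef
    by_cases hk : key ≠ ""
    · -- keyed line: A's step = merging one new record
      have hA : pvAStep (pvMergeF cs, (cs.getLast?).map Prod.fst) raw =
          (pvMergeF (cs ++ [(key, if val ≠ "" then [val] else [])]),
           ((cs ++ [(key, if val ≠ "" then [val] else [])]).getLast?).map Prod.fst) := by
        rw [pvMergeF_concat]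
        simp only [pvAStep, ← hkeydef, ← hvaldef, if_pos hk, List.getLast?_concat,
          Option.map_some]
        rw [pvKeyStep (pvMergeF cs) key val (pvNodup_mergeF cs)]
      have hB : pvChunkStep cs (pvParseLine raw) =
          cs ++ [(key, if val ≠ "" then [val] else [])] := by
        simp [pvChunkStep, pvParseLine, ← hkeydef, ← hvaldef, hk]
      rw [hA, hB]
      refine ih _ ?_
      intro p hp
      rcases List.mem_append.1 hp with h | h
      · exact hcs p h
      · simp at h; simp [h, hk]
    · -- continuation line
      rw [not_not] at hk
      rcases List.eq_nil_or_concat cs with rfl | ⟨cs₀, ⟨c, vs⟩, rfl⟩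
      · -- no record open: both sides skip the line
        have hA : pvAStep (pvMergeF [], Option.map Prod.fst ([] : List (String × List String)).getLast?) raw
            = (pvMergeF [], none) := by
          simp [pvAStep, ← hkeydef, hk]
        have hB : pvChunkStep [] (pvParseLine raw) = [] := by
          simp [pvChunkStep, pvParseLine, ← hkeydef, ← hvaldef, hk]
        rw [hA, hB]
        exact ih [] (by simp)
      · simp only [List.concat_eq_append] at hcs ⊢
        have hc0 : c ≠ "" := hcs (c, vs) (by simp)
        by_cases hv : val ≠ ""
        · -- append to the open record / modify current key's entry
          have hA : pvAStep (pvMergeF (cs₀ ++ [(c, vs)]),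
              Option.map Prod.fst ((cs₀ ++ [(c, vs)]).getLast?)) raw =
              (pvMergeF (cs₀ ++ [(c, vs ++ [val])]),
               Option.map Prod.fst ((cs₀ ++ [(c, vs ++ [val])]).getLast?)) := by
            rw [pvMergeF_concat, pvMergeF_concat]
            simp only [pvAStep, ← hkeydef, ← hvaldef, hk, ne_eq, not_true_eq_false, if_false,
              List.getLast?_concat, Option.map_some, hc0, hv, not_false_eq_true, decide_true,
              Bool.and_self, if_true]
            rw [pvContStep]
          have hB : pvChunkStep (cs₀ ++ [(c, vs)]) (pvParseLine raw) =
              cs₀ ++ [(c, vs ++ [val])] := by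
            simp [pvChunkStep, pvParseLine, ← hkeydef, ← hvaldef, hk, hv]
          rw [hA, hB]
          refine ih _ ?_
          intro p hp
          rcases List.mem_append.1 hp with h | h
          · exact hcs p (List.mem_append.2 (Or.inl h))
          · simp at h; simp [h, hc0]
        · -- empty continuation value: both sides skip
          rw [not_not] at hv
          have hA : pvAStep (pvMergeF (cs₀ ++ [(c, vs)]),
              Option.map Prod.fst ((cs₀ ++ [(c, vs)]).getLast?)) raw =
              (pvMergeF (cs₀ ++ [(c, vs)]), Option.map Prod.fst ((cs₀ ++ [(c, vs)]).getLast?)) := by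
            simp [pvAStep, ← hkeydef, ← hvaldef, hk, hv]
          have hB : pvChunkStep (cs₀ ++ [(c, vs)]) (pvParseLine raw) = cs₀ ++ [(c, vs)] := by
            simp [pvChunkStep, pvParseLine, ← hkeydef, ← hvaldef, hk, hv]
          rw [hA, hB]
          exact ih _ hcs

-- ===== VERDICT (by name: the statement is the Claim_ definition above) =====
theorem parse_kegg_flat_spec : Claim_equal_parse_kegg_flat := by
  intro text _
  show _ = _
  unfold parse_kegg_flat parse_kegg_flat_alt
  have := pvMain (PySem.Str.splitlines text) [] (by simp)
  simp only [pvMergeF, List.foldl_nil, List.getLast?_nil, Option.map_none] at this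
  rw [this]
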